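-- pv_equiv track=rewrite | github.com/ChinmoyBD/Competitive_Programming | HackerRank/contests/CODECHEF/covidlq.py | covidlq
-- ===== SOURCE A (Python) =====
-- def covidlq(li):
--     count = 0
--     co = 0
--     for i in li:
--         if i == 1 and co != 0 and count < 5:
--             return "NO"
--         count += 1
--         if i == 1:
--             co += 1
--             count = 0
--
--     return "YES"
-- ===== SOURCE B (Python) =====
-- def covidlq(li):
--     positions = [i for i, x in enumerate(li) if x == 1]
--     for p, q in zip(positions, positions[1:]):
--         if q - p <= 5:
--             return "NO"
--     return "YES"
-- ===== Notes on version B (the rewrite author's own statement) =====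
-- stated objective: alternative
-- what changed: Replaced A's fused single pass with two running counters (ones seen, steps since last 1) by collecting the indices of 1s via enumerate and then scanning consecutive index pairs for a difference <= 5.
import Mathlib
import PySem

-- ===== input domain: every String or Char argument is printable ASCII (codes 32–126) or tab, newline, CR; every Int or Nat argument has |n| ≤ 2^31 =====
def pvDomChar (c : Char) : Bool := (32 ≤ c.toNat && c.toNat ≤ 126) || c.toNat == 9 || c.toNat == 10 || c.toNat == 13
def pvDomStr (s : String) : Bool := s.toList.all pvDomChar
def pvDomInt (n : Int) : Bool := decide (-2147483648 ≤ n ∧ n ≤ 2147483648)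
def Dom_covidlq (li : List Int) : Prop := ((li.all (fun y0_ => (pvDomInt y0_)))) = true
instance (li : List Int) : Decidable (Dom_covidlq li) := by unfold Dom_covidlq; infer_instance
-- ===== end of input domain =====

-- B collects the indices of the 1s and scans consecutive index pairs, instead of A's fused pass with two running counters (an alternative decomposition, same cost).

-- ===== PORT A =====
-- A's for-loop with its two counters `count` and `co`; early return "NO"
def covidlqLoop : List Int → Int → Int → String
  | [], _, _ => "YES"
  | i :: rest, count, co =>
    if i = 1 ∧ co ≠ 0 ∧ count < 5 then "NO"
    else if i = 1 then covidlqLoop rest 0 (co + 1)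
    else covidlqLoop rest (count + 1) co

def covidlq (li : List Int) : String := covidlqLoop li 0 0

-- ===== PORT B =====
-- B's for-loop over zip(positions, positions[1:]): scan consecutive pairs
def pairScan : List Int → String
  | p :: q :: rest => if q - p ≤ 5 then "NO" else pairScan (q :: rest)
  | _ => "YES"

-- positions = [i for i, x in enumerate(li) if x == 1]
def covidlq_alt (li : List Int) : String :=
  pairScan (((PySem.List.enumerate li).filter (fun p => p.2 == 1)).map (fun p => p.1))

-- ===== PRECONDITION & SPEC =====
def Spec_covidlq (li : List Int) (out : String) : Prop := out = covidlq_alt li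
instance (li : List Int) (out : String) : Decidable (Spec_covidlq li out) := by unfold Spec_covidlq; infer_instance

-- ===== CLAIM (what is proved, stated in full; the proofs are below) =====
def Claim_equal_covidlq : Prop := ∀ (li : List Int), Dom_covidlq li → Spec_covidlq li (covidlq li)

-- ===== LEMMAS AND PROOFS =====

-- the list B's pairScan runs on: positions of the 1s (0-based)
def posInts (li : List Int) : List Int :=
  ((PySem.List.enumerate li).filter (fun p => p.2 == 1)).map (fun p => p.1)

theorem enumerate_shift {α : Type} (xs : List α) (s : Int) :
    PySem.List.enumerate xs (s + 1)
      = (PySem.List.enumerate xs s).map (fun p => (p.1 + 1, p.2)) := by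
  induction xs generalizing s with
  | nil => simp [PySem.List.enumerate]
  | cons x t ih => simp [PySem.List.enumerate_cons, ih (s + 1)]

theorem posInts_cons (i : Int) (rest : List Int) :
    posInts (i :: rest)
      = (if i = 1 then [(0 : Int)] else []) ++ (posInts rest).map (· + 1) := by
  have h : PySem.List.enumerate rest 1
      = (PySem.List.enumerate rest 0).map (fun p => (p.1 + 1, p.2)) := by
    simpa using enumerate_shift rest 0
  by_cases hi : i = 1 <;>
    simp [posInts, PySem.List.enumerate_cons, h, List.filter_map, List.map_map,
      Function.comp_def, hi]

theorem pairScan_shift (xs : List Int) (c : Int) :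
    pairScan (xs.map (· + c)) = pairScan xs := by
  induction xs with
  | nil => rfl
  | cons p t ih =>
    cases t with
    | nil => rfl
    | cons q r =>
      have hd : q + c - (p + c) = q - p := by ring
      simp only [List.map_cons] at ih ⊢
      simp only [pairScan, hd]
      split
      · rfl
      · exact ih

theorem loop_eq (li : List Int) (count co : Int) (hco : 0 ≤ co) :
    covidlqLoop li count co
      = pairScan (if co = 0 then posInts li else (-(count + 1)) :: posInts li) := by
  induction li generalizing count co with
  | nil =>
    by_cases h : co = 0 <;> simp [covidlqLoop, posInts, PySem.List.enumerate, pairScan, h]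
  | cons i rest ih =>
    by_cases hi : i = 1
    · by_cases hc : co = 0
      · -- first 1: condition fails, continue with count = 0, co + 1
        have h1 : covidlqLoop (i :: rest) count co = covidlqLoop rest 0 (co + 1) := by
          simp [covidlqLoop, hi, hc]
        have h2 := ih 0 (co + 1) (by omega)
        have h3 : (co + 1) ≠ 0 := by omega
        rw [h1, h2, posInts_cons, if_pos hi]
        simp only [if_neg h3, if_pos hc]
        have : ((0 : Int) :: (posInts rest).map (· + 1))
            = ((-(0 + 1)) :: posInts rest).map (· + 1) := by
          simp
        rw [List.singleton_append, this, pairScan_shift]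
      · by_cases hlt : count < 5
        · -- a 1 too close to the previous 1: both return "NO"
          have h1 : covidlqLoop (i :: rest) count co = "NO" := by
            simp [covidlqLoop, hi, hc, hlt]
          rw [h1, if_neg hc, posInts_cons, if_pos hi, List.singleton_append]
          simp only [pairScan]
          rw [if_pos (by omega : (0 : Int) - (-(count + 1)) ≤ 5)]
        · -- a 1 far enough: both continue past this 1
          have h1 : covidlqLoop (i :: rest) count co = covidlqLoop rest 0 (co + 1) := by
            simp [covidlqLoop, hi, hc, hlt]
          have h2 := ih 0 (co + 1) (by omega)
          have h3 : (co + 1) ≠ 0 := by omega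
          rw [h1, h2, if_neg hc, posInts_cons, if_pos hi, List.singleton_append]
          simp only [if_neg h3]
          rw [show pairScan ((-(count + 1)) :: (0 : Int) :: (posInts rest).map (· + 1))
              = pairScan ((0 : Int) :: (posInts rest).map (· + 1)) from by
            simp only [pairScan]
            rw [if_neg (by omega : ¬ ((0 : Int) - (-(count + 1)) ≤ 5))]]
          have : ((0 : Int) :: (posInts rest).map (· + 1))
              = ((-(0 + 1)) :: posInts rest).map (· + 1) := by simp
          rw [this, pairScan_shift]
    · -- not a 1: A bumps count, B's position list is just shifted
      have h1 : covidlqLoop (i :: rest) count co = covidlqLoop rest (count + 1) co := by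
        simp [covidlqLoop, hi]
      have h2 := ih (count + 1) co hco
      rw [h1, h2, posInts_cons, if_neg hi, List.nil_append]
      by_cases hc : co = 0
      · simp only [if_pos hc]
        exact (pairScan_shift (posInts rest) 1).symm
      · simp only [if_neg hc]
        have : ((-(count + 1)) :: (posInts rest).map (· + 1))
            = ((-(count + 1 + 1)) :: posInts rest).map (· + 1) := by
          simp only [List.map_cons]
          congr 1
          ring
        rw [this, pairScan_shift]

-- ===== VERDICT (by name: the statement is the Claim_ definition above) =====
theorem covidlq_spec : Claim_equal_covidlq := by
  intro li _
  show covidlq li = covidlq_alt li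
  have h := loop_eq li 0 0 le_rfl
  simpa [covidlq, covidlq_alt, posInts] using h
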